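-- pv_equiv track=rewrite | github.com/awslabs/nki-autotune | nkigym/src/nkigym/program_to_nki/_loop_rolling_search.py | _block_ext_names
-- ===== SOURCE A (Python) =====
-- def _block_ext_names(
--     per_assigned: list[frozenset[str]], per_referenced: list[frozenset[str]], start: int, block_size: int
-- ) -> frozenset[str]:
--     """Compute upward-exposed uses (referenced before assigned) for a statement block."""
--     assigned_so_far: set[str] = set()
--     external: set[str] = set()
--     for i in range(start, start + block_size):
--         external |= per_referenced[i] - assigned_so_far
--         assigned_so_far |= per_assigned[i]
--     return frozenset(external)
-- ===== SOURCE B (Python) =====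
-- def _block_ext_names(
--     per_assigned: list[frozenset[str]], per_referenced: list[frozenset[str]], start: int, block_size: int
-- ) -> frozenset[str]:
--     """Backward liveness sweep: walk the block last statement to first with a while loop,
--     rebuilding one immutable frozenset per step: ext = gen_i | (ext - kill_i)."""
--     ext: frozenset[str] = frozenset()
--     i = start + block_size - 1
--     while i >= start:
--         ext = per_referenced[i] | (ext - per_assigned[i])
--         i -= 1
--     return ext
-- ===== Notes on version B (the rewrite author's own statement) =====
-- stated objective: alternative
-- what changed: Replaces A's forward scan maintaining two mutable sets (assigned_so_far and external) with a backward while-loop over the block that keeps a single immutable frozenset via the standard liveness recurrence ext = gen_i | (ext - kill_i).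
import Mathlib
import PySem

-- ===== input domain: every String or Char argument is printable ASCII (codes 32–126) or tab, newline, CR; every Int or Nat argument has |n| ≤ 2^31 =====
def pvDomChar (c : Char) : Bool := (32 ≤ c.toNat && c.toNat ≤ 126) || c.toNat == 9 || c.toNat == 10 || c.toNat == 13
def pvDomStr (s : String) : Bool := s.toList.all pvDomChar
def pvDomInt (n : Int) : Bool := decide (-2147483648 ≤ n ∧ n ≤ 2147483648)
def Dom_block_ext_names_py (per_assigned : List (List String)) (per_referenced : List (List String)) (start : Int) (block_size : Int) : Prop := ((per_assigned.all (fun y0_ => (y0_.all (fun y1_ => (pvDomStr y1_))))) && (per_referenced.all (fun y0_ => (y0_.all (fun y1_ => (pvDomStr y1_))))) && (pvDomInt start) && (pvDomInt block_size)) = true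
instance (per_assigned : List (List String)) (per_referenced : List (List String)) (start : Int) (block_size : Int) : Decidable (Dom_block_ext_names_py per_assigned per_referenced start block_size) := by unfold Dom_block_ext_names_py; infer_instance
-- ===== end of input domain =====

-- B replaces A's forward scan with two mutable sets by a backward while-loop over the
-- block keeping a single immutable set via ext = gen_i | (ext - kill_i) (alternative, same cost).
-- frozenset output has no observable order; both ports return it canonically sorted.


-- ===== PORT A =====
-- loop body of A: state (assigned_so_far, external);
-- external |= per_referenced[i] - assigned_so_far; assigned_so_far |= per_assigned[i]
def pvStepA (per_assigned per_referenced : List (List String))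
    (st : PySem.Set String × PySem.Set String) (i : Int) :
    PySem.Set String × PySem.Set String :=
  let external := PySem.Set.union st.2
    (PySem.Set.diff (PySem.Set.ofList (PySem.List.pyGetD per_referenced i [])) st.1)
  let assigned := PySem.Set.update st.1 (PySem.List.pyGetD per_assigned i [])
  (assigned, external)

def block_ext_names_py (per_assigned : List (List String)) (per_referenced : List (List String)) (start : Int) (block_size : Int) : List String :=
  let st := (PySem.List.pyRange start (start + block_size) 1).foldl
    (pvStepA per_assigned per_referenced) (PySem.Set.empty, PySem.Set.empty)
  -- frozenset(external): a frozenset has no modelled iteration order; canonical sorted form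
  PySem.List.sorted st.2 (fun x => x) false

-- ===== PORT B =====
-- the while loop 'while i >= start: ext = pr[i] | (ext - pa[i]); i -= 1'
-- as recursion on the remaining iteration count (exactly max(block_size,0) iterations)
def pvWhileB (per_assigned per_referenced : List (List String)) :
    Nat → Int → PySem.Set String → PySem.Set String
  | 0, _, ext => ext
  | n + 1, i, ext =>
      pvWhileB per_assigned per_referenced n (i - 1)
        (PySem.Set.union (PySem.Set.ofList (PySem.List.pyGetD per_referenced i []))
          (PySem.Set.diff ext (PySem.List.pyGetD per_assigned i [])))

def block_ext_names_py_alt (per_assigned : List (List String)) (per_referenced : List (List String)) (start : Int) (block_size : Int) : List String :=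
  let ext := pvWhileB per_assigned per_referenced block_size.toNat
    (start + block_size - 1) PySem.Set.empty
  -- frozenset(ext): canonical sorted form, as in port A
  PySem.List.sorted ext (fun x => x) false

-- ===== PRECONDITION & SPEC =====
-- Pre_: every index the loop touches is a valid Python index of both lists
-- (otherwise both A and B raise IndexError at per_assigned[i]/per_referenced[i]).
def Pre_block_ext_names_py (per_assigned : List (List String)) (per_referenced : List (List String)) (start : Int) (block_size : Int) : Prop :=
  0 < block_size →
    (PySem.Raise.InRange per_referenced.length start ∧
     PySem.Raise.InRange per_referenced.length (start + block_size - 1) ∧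
     PySem.Raise.InRange per_assigned.length start ∧
     PySem.Raise.InRange per_assigned.length (start + block_size - 1))
instance (per_assigned : List (List String)) (per_referenced : List (List String)) (start : Int) (block_size : Int) : Decidable (Pre_block_ext_names_py per_assigned per_referenced start block_size) := by unfold Pre_block_ext_names_py; infer_instance

def pvWitness_block_ext_names_py : List (List String) × List (List String) × Int × Int :=
  ([["x"], ["y"]], [["y"], ["x", "z"]], 0, 2)

def Spec_block_ext_names_py (per_assigned : List (List String)) (per_referenced : List (List String)) (start : Int) (block_size : Int) (out : List String) : Prop := out = block_ext_names_py_alt per_assigned per_referenced start block_size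
instance (per_assigned : List (List String)) (per_referenced : List (List String)) (start : Int) (block_size : Int) (out : List String) : Decidable (Spec_block_ext_names_py per_assigned per_referenced start block_size out) := by unfold Spec_block_ext_names_py; infer_instance

-- ===== CLAIM (what is proved, stated in full; the proofs are below) =====
def Claim_equal_block_ext_names_py : Prop := ∀ (per_assigned : List (List String)) (per_referenced : List (List String)) (start : Int) (block_size : Int), Dom_block_ext_names_py per_assigned per_referenced start block_size → Pre_block_ext_names_py per_assigned per_referenced start block_size → Spec_block_ext_names_py per_assigned per_referenced start block_size (block_ext_names_py per_assigned per_referenced start block_size)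

-- ===== LEMMAS AND PROOFS =====

-- one step of B, as the proofs speak about it
def pvStepB (per_assigned per_referenced : List (List String))
    (ext : PySem.Set String) (i : Int) : PySem.Set String :=
  PySem.Set.union (PySem.Set.ofList (PySem.List.pyGetD per_referenced i []))
    (PySem.Set.diff ext (PySem.List.pyGetD per_assigned i []))

-- B's while loop is the right fold of pvStepB over the ascending index range
theorem pv_whileB_eq (pa pr : List (List String)) :
    ∀ (n : Nat) (i : Int) (ext : PySem.Set String),
      pvWhileB pa pr n i ext =
        (PySem.List.pyRange (i + 1 - n) (i + 1) 1).foldr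
          (fun j acc => pvStepB pa pr acc j) ext := by
  intro n
  induction n with
  | zero =>
      intro i ext
      rw [PySem.List.pyRange_one_eq_nil (by omega)]
      rfl
  | succ n ih =>
      intro i ext
      have h1 : (i + 1 - ((n + 1 : Nat) : Int)) = i - (n : Int) := by push_cast; ring
      have h2 : PySem.List.pyRange (i - (n : Int)) (i + 1) 1 =
          PySem.List.pyRange (i - (n : Int)) i 1 ++ [i] :=
        PySem.List.pyRange_one_succ_right (by omega)
      rw [h1, h2, List.foldr_append]
      have h3 : (i - 1 + 1 - (n : Int)) = i - (n : Int) := by ring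
      have := ih (i - 1) (pvStepB pa pr ext i)
      rw [h3] at this
      simpa [pvWhileB, pvStepB, Int.sub_add_cancel] using this

-- the forward fold's external set has the members given by the backward recurrence
theorem pv_key (pa pr : List (List String)) (L : List Int) :
    ∀ (A0 E0 : PySem.Set String) (x : String),
      (x ∈ (L.foldl (pvStepA pa pr) (A0, E0)).2) ↔
        (x ∈ E0 ∨ (x ∉ A0 ∧ x ∈ L.foldr (fun i acc => pvStepB pa pr acc i) PySem.Set.empty)) := by
  induction L with
  | nil =>
      intro A0 E0 x
      simp [PySem.Set.empty]
  | cons i rest ih =>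
      intro A0 E0 x
      simp only [List.foldl_cons, List.foldr_cons]
      rw [show pvStepA pa pr (A0, E0) i =
        (PySem.Set.update A0 (PySem.List.pyGetD pa i []),
         PySem.Set.union E0 (PySem.Set.diff (PySem.Set.ofList (PySem.List.pyGetD pr i [])) A0)) from rfl]
      rw [ih]
      simp only [pvStepB, PySem.Set.mem_union, PySem.Set.mem_diff, PySem.Set.mem_ofList,
        PySem.Set.mem_update]
      tauto

theorem pv_nodupA (pa pr : List (List String)) (L : List Int) :
    ∀ st : PySem.Set String × PySem.Set String, st.2.Nodup →
      ((L.foldl (pvStepA pa pr) st).2).Nodup := by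
  induction L with
  | nil => intro st h; exact h
  | cons i rest ih =>
      intro st h
      exact ih _ (PySem.Set.nodup_union st.2 _ h)

theorem pv_nodupB (pa pr : List (List String)) (L : List Int) :
    (L.foldr (fun i acc => pvStepB pa pr acc i) PySem.Set.empty).Nodup := by
  induction L with
  | nil => exact List.nodup_nil
  | cons i rest ih =>
      exact PySem.Set.nodup_union _ _ (PySem.Set.nodup_ofList _)

-- B's loop result, rewritten as the right fold over A's index list (all block_size)
theorem pv_altB (pa pr : List (List String)) (start bs : Int) :
    pvWhileB pa pr bs.toNat (start + bs - 1) PySem.Set.empty =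
      (PySem.List.pyRange start (start + bs) 1).foldr
        (fun i acc => pvStepB pa pr acc i) PySem.Set.empty := by
  rcases le_or_gt bs 0 with h | h
  · have : bs.toNat = 0 := by omega
    rw [this, PySem.List.pyRange_one_eq_nil (by omega)]
    rfl
  · have := pv_whileB_eq pa pr bs.toNat (start + bs - 1) PySem.Set.empty
    have h1 : (start + bs - 1 + 1 - (bs.toNat : Int)) = start := by omega
    have h2 : (start + bs - 1 + 1) = start + bs := by ring
    rw [h1, h2] at this
    exact this

-- ===== VERDICT (by name: the statement is the Claim_ definition above) =====
theorem block_ext_names_py_spec : Claim_equal_block_ext_names_py := by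
  unfold Claim_equal_block_ext_names_py
  intro pa pr start bs _dom _pre
  unfold Spec_block_ext_names_py block_ext_names_py block_ext_names_py_alt
  rw [pv_altB]
  apply PySem.List.sorted_eq_sorted_of_perm _ _ _ (fun a b h => h)
  refine (List.perm_ext_iff_of_nodup
      (pv_nodupA pa pr _ _ List.nodup_nil) (pv_nodupB pa pr _)).mpr ?_
  intro x
  rw [pv_key pa pr _ PySem.Set.empty PySem.Set.empty x]
  simp [PySem.Set.empty]
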